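-- pv_equiv track=rewrite | github.com/ivangol739/codewars | Array Conversion.py | array_conversion
-- ===== SOURCE A (Python) =====
-- def array_conversion(arr):
--   is_odd = True
--   while len(arr) > 1:
--     nums = []
--     for i in range(0, len(arr), 2):
--       if is_odd:
--         nums.append(arr[i] + arr[i+1])
--       else:
--         nums.append(arr[i] * arr[i+1])
--     is_odd = not is_odd
--     arr = nums
--   return arr[0]
-- ===== SOURCE B (Python) =====
-- def array_conversion(arr, add_op=True):
--     if len(arr) <= 1:
--         return arr[0]
--     it = iter(arr)
--     nxt = [(x + y) if add_op else (x * y) for x, y in zip(it, it)]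
--     return array_conversion(nxt, not add_op)
-- ===== Notes on version B (the rewrite author's own statement) =====
-- stated objective: alternative
-- what changed: Replaces the imperative while-loop that repeatedly reassigns the array (with an index loop range(0,len,2) reading arr[i], arr[i+1]) by a tail recursion over the shrinking array whose levels are built by pairwise-consuming zip over a single iterator, alternating the operation via an accumulator flag.
import Mathlib
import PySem

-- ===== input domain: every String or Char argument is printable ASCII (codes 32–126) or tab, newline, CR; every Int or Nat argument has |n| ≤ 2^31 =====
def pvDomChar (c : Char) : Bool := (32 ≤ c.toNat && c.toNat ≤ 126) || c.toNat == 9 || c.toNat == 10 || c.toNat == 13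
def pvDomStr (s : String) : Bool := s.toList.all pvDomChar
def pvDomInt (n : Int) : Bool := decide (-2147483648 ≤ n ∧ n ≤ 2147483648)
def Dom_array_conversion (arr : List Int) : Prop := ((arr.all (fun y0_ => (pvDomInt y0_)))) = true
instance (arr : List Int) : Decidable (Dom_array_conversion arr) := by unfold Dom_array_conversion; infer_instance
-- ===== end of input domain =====

-- B replaces A's while-loop of index-based passes (range(0,len,2), arr[i], arr[i+1]) by
-- recursion over the shrinking array with zip-based pairwise levels (objective: alternative).

-- ===== PORT A =====
-- one pass of A's inner 'for i in range(0, len(arr), 2)' loop appending arr[i]+arr[i+1] / arr[i]*arr[i+1]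
def pvA_pass (arr : List Int) (isOdd : Bool) : List Int :=
  (PySem.List.pyRange 0 (arr.length : Int) 2).foldl
    (fun nums i =>
      nums ++ [if isOdd then PySem.List.pyGetD arr i 0 + PySem.List.pyGetD arr (i + 1) 0
               else PySem.List.pyGetD arr i 0 * PySem.List.pyGetD arr (i + 1) 0]) []

-- A's while-loop: arr is reassigned to the pass result, is_odd flips.
-- The fuel argument is only a totality guard: arr.length bounds the number of
-- iterations, since every iteration strictly shrinks a list of length > 1.
def pvA_loopF : Nat → List Int → Bool → List Int
  | 0, arr, _ => arr
  | fuel + 1, arr, isOdd =>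
      if arr.length > 1 then pvA_loopF fuel (pvA_pass arr isOdd) (!isOdd) else arr

def array_conversion (arr : List Int) : Int :=
  PySem.List.pyGetD (pvA_loopF arr.length arr true) 0 0

-- ===== PORT B =====
-- '[(x+y) if add_op else (x*y) for x, y in zip(it, it)]' — consume two at a time
def pvB_pairs (addOp : Bool) : List Int → List Int
  | x :: y :: t => (if addOp then x + y else x * y) :: pvB_pairs addOp t
  | _ => []

-- recursion over the shrinking array; fuel is only a totality guard (each level halves)
def pvB_goF : Nat → List Int → Bool → Int
  | 0, arr, _ => PySem.List.pyGetD arr 0 0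
  | fuel + 1, arr, addOp =>
      if arr.length ≤ 1 then PySem.List.pyGetD arr 0 0
      else pvB_goF fuel (pvB_pairs addOp arr) (!addOp)

def array_conversion_alt (arr : List Int) : Int :=
  pvB_goF arr.length arr true

-- ===== PRECONDITION & SPEC =====
-- Pre_: A raises IndexError unless the length is a power of two (the empty array at
-- its final first-element read; any other non-power length reaches an odd-length
-- level > 1, whose out-of-range second pair index raises), so exactly the
-- power-of-two lengths are admitted.
def Pre_array_conversion (arr : List Int) : Prop :=
  ∃ k ≤ arr.length, arr.length = 2 ^ k
instance (arr : List Int) : Decidable (Pre_array_conversion arr) := by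
  unfold Pre_array_conversion; infer_instance

def pvWitness_array_conversion : List Int := [1, 2, 3, 4]

def Spec_array_conversion (arr : List Int) (out : Int) : Prop := out = array_conversion_alt arr
instance (arr : List Int) (out : Int) : Decidable (Spec_array_conversion arr out) := by unfold Spec_array_conversion; infer_instance

-- ===== CLAIM (what is proved, stated in full; the proofs are below) =====
def Claim_equal_array_conversion : Prop := ∀ (arr : List Int), Dom_array_conversion arr → Pre_array_conversion arr → Spec_array_conversion arr (array_conversion arr)

-- ===== LEMMAS AND PROOFS =====

-- the body of A's pass, as a function of the loop index
def pvOp (b : Bool) (arr : List Int) (i : Int) : Int :=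
  if b then PySem.List.pyGetD arr i 0 + PySem.List.pyGetD arr (i + 1) 0
  else PySem.List.pyGetD arr i 0 * PySem.List.pyGetD arr (i + 1) 0

-- A's pass written as a map over the step-2 range
theorem pvA_pass_eq_map (arr : List Int) (b : Bool) :
    pvA_pass arr b =
      (List.range (if arr.length = 0 then 0 else (arr.length + 1) / 2)).map
        (fun (k : Nat) => pvOp b arr (2 * (k : Int))) := by
  unfold pvA_pass
  rw [PySem.List.foldl_append_singleton_eq_map,
      PySem.List.pyRange_of_pos 0 (arr.length : Int) (by norm_num), List.map_map]
  have hc : (if (0:Int) < (arr.length : Int) then (((arr.length : Int) - 0 + 2 - 1) / 2).toNat else 0)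
      = (if arr.length = 0 then 0 else (arr.length + 1) / 2) := by
    split_ifs <;> omega
  rw [hc]
  simp only [List.nil_append]
  apply List.map_congr_left
  intro k _
  simp [pvOp, Function.comp]

-- A's pass peels off exactly one pair at the front
theorem pvA_pass_cons (x y : Int) (t : List Int) (b : Bool) :
    pvA_pass (x :: y :: t) b = (if b then x + y else x * y) :: pvA_pass t b := by
  rw [pvA_pass_eq_map, pvA_pass_eq_map]
  have hc : (if (x :: y :: t).length = 0 then 0 else ((x :: y :: t).length + 1) / 2)
      = (if t.length = 0 then 0 else (t.length + 1) / 2) + 1 := by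
    simp only [List.length_cons]; split_ifs <;> omega
  rw [hc, List.range_succ_eq_map, List.map_cons, List.map_map]
  congr 1
  · have h0 : (2 * (((0:Nat) : Int))) = ((0 : Nat) : Int) := by norm_num
    have h1 : (((0:Nat) : Int) + 1) = ((1 : Nat) : Int) := by norm_num
    simp only [pvOp, h0, h1, PySem.List.pyGetD_natCast]
    simp [List.getD]
  · apply List.map_congr_left
    intro k _
    have h1 : (2 * (((k : Int)) + 1)) = (((2 * k + 2 : Nat) : Int)) := by push_cast; ring
    have h2 : (((2 * k + 2 : Nat) : Int) + 1) = ((((2 * k + 1) + 2 : Nat) : Int)) := by push_cast; ring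
    have h3 : (2 * (k : Int)) = (((2 * k : Nat) : Int)) := by push_cast; ring
    have h4 : (((2 * k : Nat) : Int) + 1) = (((2 * k + 1 : Nat) : Int)) := by push_cast; ring
    simp only [Function.comp, pvOp, Nat.cast_succ]
    rw [h1, h2]
    conv_rhs => rw [h3, h4]
    
    simp only [PySem.List.pyGetD_natCast]
    have g : ∀ (l : List Int) (n : Nat), List.getD (x :: y :: l) (n + 2) 0 = List.getD l n 0 := by
      intro l n; simp [List.getD]
    rw [g, g]

theorem pvA_pass_nil (b : Bool) : pvA_pass [] b = [] := by
  rw [pvA_pass_eq_map]; simp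

-- On an even-length list, A's index pass computes exactly B's pairwise zip level.
theorem pass_eq_pairs (arr : List Int) (b : Bool) (h : 2 ∣ arr.length) :
    pvA_pass arr b = pvB_pairs b arr := by
  induction arr using pvB_pairs.induct with
  | case1 x y t ih =>
      rw [pvA_pass_cons, pvB_pairs]
      rw [ih (by simp only [List.length_cons] at h; omega)]
  | case2 l hne =>
      cases l with
      | nil => rw [pvA_pass_nil]; rfl
      | cons x t =>
        cases t with
        | nil => simp at h
        | cons y t => exact absurd rfl (hne x y t)

theorem pvB_pairs_length (addOp : Bool) (l : List Int) :
    (pvB_pairs addOp l).length = l.length / 2 := by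
  induction l using pvB_pairs.induct with
  | case1 x y t ih => simp only [pvB_pairs, List.length_cons, ih]; omega
  | case2 l hne =>
      cases l with
      | nil => simp [pvB_pairs]
      | cons x t =>
        cases t with
        | nil => simp [pvB_pairs]
        | cons y t => exact absurd rfl (hne x y t)

-- main invariant: on a power-of-two length, A's loop ends with the singleton of B's result
theorem loop_eq_go (k : Nat) : ∀ (fa fb : Nat) (arr : List Int) (b : Bool),
    arr.length = 2 ^ k → k ≤ fa → k ≤ fb →
    pvA_loopF fa arr b = [pvB_goF fb arr b] := by
  induction k with
  | zero =>
      intro fa fb arr b hlen _ _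
      obtain ⟨x, rfl⟩ := List.length_eq_one_iff.mp (by simpa using hlen)
      cases fa <;> cases fb <;> rfl
  | succ k ih =>
      intro fa fb arr b hlen hfa hfb
      match fa, fb, hfa, hfb with
      | fa' + 1, fb' + 1, hfa, hfb =>
        have h2 : arr.length > 1 := by
          rw [hlen]; exact Nat.one_lt_two_pow_iff.mpr (by omega)
        have hdvd : 2 ∣ arr.length := by
          rw [hlen, pow_succ]; omega
        have hlen' : (pvB_pairs b arr).length = 2 ^ k := by
          rw [pvB_pairs_length, hlen, pow_succ]; omega
        simp only [pvA_loopF, pvB_goF, if_pos h2, if_neg (by omega : ¬ arr.length ≤ 1)]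
        rw [pass_eq_pairs arr b hdvd]
        exact ih fa' fb' (pvB_pairs b arr) (!b) hlen' (by omega) (by omega)

-- ===== VERDICT (by name: the statement is the Claim_ definition above) =====
theorem array_conversion_spec : Claim_equal_array_conversion := by
  intro arr _ hpre
  obtain ⟨k, _, hk⟩ := hpre
  unfold Spec_array_conversion array_conversion array_conversion_alt
  rw [loop_eq_go k arr.length arr.length arr true hk
        (by rw [hk]; exact Nat.lt_two_pow_self.le) (by rw [hk]; exact Nat.lt_two_pow_self.le)]
  simp [PySem.List.pyGetD_zero_cons]
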